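-- pv_equiv track=rewrite | github.com/naman-6420/langdiarization | rttm_maker_infer.py | predictions_to_segments
-- ===== SOURCE A (Python) =====
-- def predictions_to_segments(predictions, frame_duration_ms=200):
--     """Converts a sequence of frame-by-frame predictions into a list of segments."""
--     segments = []
--     if not predictions:
--         return segments
--     current_label = predictions[0]
--     start_time = 0
--     for i, label in enumerate(predictions[1:], 1):
--         if label != current_label:
--             end_time = i * frame_duration_ms
--             segments.append((current_label, start_time, end_time))
--             current_label = label
--             start_time = end_time
--     end_time = len(predictions) * frame_duration_ms
--     segments.append((current_label, start_time, end_time))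
--     return segments
-- ===== SOURCE B (Python) =====
-- def predictions_to_segments(predictions, frame_duration_ms=200):
--     """Converts a sequence of frame-by-frame predictions into a list of segments."""
--     n = len(predictions)
--     if n == 0:
--         return []
--     cuts = [0] + [i for i in range(1, n) if predictions[i] != predictions[i - 1]] + [n]
--     return [(predictions[b], b * frame_duration_ms, e * frame_duration_ms)
--             for b, e in zip(cuts, cuts[1:])]
-- ===== Notes on version B (the rewrite author's own statement) =====
-- stated objective: alternative
-- what changed: Replaces A's single-pass accumulator loop (tracking current label and start time, with a post-loop flush) by staged passes: first compute the list of boundary indices where the label changes, then zip consecutive boundaries into segments by index arithmetic.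
import Mathlib
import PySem

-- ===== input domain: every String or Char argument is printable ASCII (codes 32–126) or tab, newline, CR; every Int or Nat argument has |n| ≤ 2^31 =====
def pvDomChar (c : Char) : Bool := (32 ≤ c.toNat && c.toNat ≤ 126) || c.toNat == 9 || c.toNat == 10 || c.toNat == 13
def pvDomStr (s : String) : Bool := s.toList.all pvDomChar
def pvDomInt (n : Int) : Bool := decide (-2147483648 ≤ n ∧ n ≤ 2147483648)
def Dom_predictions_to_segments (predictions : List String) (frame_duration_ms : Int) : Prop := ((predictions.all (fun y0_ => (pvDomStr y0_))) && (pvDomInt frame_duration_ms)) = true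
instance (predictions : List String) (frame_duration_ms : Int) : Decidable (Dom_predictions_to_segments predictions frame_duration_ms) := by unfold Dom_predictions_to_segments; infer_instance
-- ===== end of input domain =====

-- B solves the same task in staged passes — first the list of boundary indices where the
-- label changes, then segments by zipping consecutive boundaries — instead of A's
-- single accumulator loop; same cost, proved equal on all inputs.

-- ===== PORT A =====
-- loop body of A's `for i, label in enumerate(predictions[1:], 1)`; state = (current_label, start_time, segments)
def pvStepA (fd : Int) (st : String × Int × List (String × Int × Int)) (iv : Int × String) :
    String × Int × List (String × Int × Int) :=
  if iv.2 ≠ st.1 then (iv.2, iv.1 * fd, st.2.2 ++ [(st.1, st.2.1, iv.1 * fd)]) else st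

def predictions_to_segments (predictions : List String) (frame_duration_ms : Int) : List (String × Int × Int) :=
  match predictions with
  | [] => []
  | p0 :: rest =>
    let st := (PySem.List.enumerate rest 1).foldl (pvStepA frame_duration_ms) (p0, 0, [])
    st.2.2 ++ [(st.1, st.2.1, (predictions.length : Int) * frame_duration_ms)]

-- ===== PORT B =====
-- `range(1, n)` is ported as List.range' 1 (n-1) and `predictions[i]` as getD i "" — exact here,
-- since every index used is a Nat in [0, n).
def predictions_to_segments_alt (predictions : List String) (frame_duration_ms : Int) : List (String × Int × Int) :=
  let n := predictions.length
  if n = 0 then []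
  else
    let cuts : List Nat :=
      0 :: ((List.range' 1 (n - 1)).filter
        (fun i => predictions.getD i "" ≠ predictions.getD (i - 1) "") ++ [n])
    (cuts.zip (cuts.drop 1)).map
      (fun be => (predictions.getD be.1 "", (be.1 : Int) * frame_duration_ms, (be.2 : Int) * frame_duration_ms))

-- ===== PRECONDITION & SPEC =====
def Spec_predictions_to_segments (predictions : List String) (frame_duration_ms : Int) (out : List (String × Int × Int)) : Prop := out = predictions_to_segments_alt predictions frame_duration_ms
instance (predictions : List String) (frame_duration_ms : Int) (out : List (String × Int × Int)) : Decidable (Spec_predictions_to_segments predictions frame_duration_ms out) := by unfold Spec_predictions_to_segments; infer_instance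

-- ===== CLAIM (what is proved, stated in full; the proofs are below) =====
def Claim_equal_predictions_to_segments : Prop := ∀ (predictions : List String) (frame_duration_ms : Int), Dom_predictions_to_segments predictions frame_duration_ms → Spec_predictions_to_segments predictions frame_duration_ms (predictions_to_segments predictions frame_duration_ms)

-- ===== LEMMAS AND PROOFS =====

-- common intermediate form: segments as runs of equal labels (used only in the proofs)
def pvGroups (xs : List String) (idx : Int) (fd : Int) : List (String × Int × Int) :=
  match xs with
  | [] => []
  | x :: rest =>
    let run := rest.takeWhile (· == x)
    let idx' := idx + 1 + run.length
    (x, idx * fd, idx' * fd) :: pvGroups (rest.drop run.length) idx' fd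
termination_by xs.length
decreasing_by
  simp only [List.length_cons, List.length_drop]
  omega

-- folding A's step over elements all equal to the current label leaves the state unchanged
theorem pvSkip (fd : Int) (xs : List String) (cur : String) (start : Int)
    (segs : List (String × Int × Int)) (i : Int) (h : ∀ y ∈ xs, y = cur) :
    (PySem.List.enumerate xs i).foldl (pvStepA fd) (cur, start, segs) = (cur, start, segs) := by
  induction xs generalizing i with
  | nil => simp [PySem.List.enumerate_nil]
  | cons x xs ih =>
    have hx : x = cur := h x (by simp)
    subst hx
    rw [PySem.List.enumerate_cons, List.foldl_cons]
    have hstep : pvStepA fd (x, start, segs) (i, x) = (x, start, segs) := by simp [pvStepA]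
    rw [hstep]
    exact ih (i + 1) (fun y hy => h y (List.mem_cons_of_mem _ hy))

-- the first element surviving dropWhile fails the predicate
theorem pvDropWhileHead {a : Type} (p : a → Bool) (l : List a) (r : a) (rs : List a)
    (h : l.dropWhile p = r :: rs) : p r = false := by
  induction l with
  | nil => simp [List.dropWhile] at h
  | cons x xs ih =>
    rw [List.dropWhile_cons] at h
    split at h
    · exact ih h
    · next hx => cases h; simpa using hx

-- invariant: A's fold (indices from j+1, start time j*fd) plus its final append
-- produces exactly the run-segments of cur :: tail starting at frame index j
theorem pvMain (fd : Int) (n : Nat) (tail : List String) (hn : tail.length ≤ n)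
    (cur : String) (j : Int) (segs : List (String × Int × Int)) :
    (let st := (PySem.List.enumerate tail (j+1)).foldl (pvStepA fd) (cur, j*fd, segs)
     st.2.2 ++ [(st.1, st.2.1, (j + 1 + (tail.length : Int)) * fd)]) =
    segs ++ pvGroups (cur :: tail) j fd := by
  induction n generalizing tail cur j segs with
  | zero =>
    have : tail = [] := List.eq_nil_of_length_eq_zero (Nat.le_zero.mp hn)
    subst this
    simp [PySem.List.enumerate_nil, pvGroups]
  | succ n ih =>
    set t1 := tail.takeWhile (· == cur) with ht1
    set rest := tail.dropWhile (· == cur) with hrest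
    have hsplit : t1 ++ rest = tail := List.takeWhile_append_dropWhile
    have ht1all : ∀ y ∈ t1, y = cur :=
      fun y hy => eq_of_beq (List.mem_takeWhile_imp (p := (· == cur)) hy)
    have hdrop : tail.drop t1.length = rest := by
      rw [← hsplit, List.drop_left]
    have henum : PySem.List.enumerate tail (j+1) =
        PySem.List.enumerate t1 (j+1) ++ PySem.List.enumerate rest (j+1+t1.length) := by
      conv_lhs => rw [← hsplit]
      rw [PySem.List.enumerate_append]
    rw [pvGroups]
    simp only [← ht1, hdrop]
    cases hr : rest with
    | nil =>
      have htail : t1 = tail := by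
        rw [hr] at hsplit
        simpa using hsplit
      rw [henum, hr, List.foldl_append,
        pvSkip fd t1 cur (j*fd) segs _ ht1all]
      simp [PySem.List.enumerate_nil, pvGroups, htail]
    | cons r rs =>
      have hrcur : (r == cur) = false :=
        pvDropWhileHead (fun x => x == cur) tail r rs (hrest.symm.trans hr)
      have hrne : r ≠ cur := fun h => by simp [h] at hrcur
      rw [hr] at hsplit
      have h2 : tail.length = t1.length + 1 + rs.length := by
        conv_lhs => rw [← hsplit]
        simp [List.length_append]
        omega
      have hlen : (tail.length : Int) = (t1.length : Int) + 1 + (rs.length : Int) := by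
        rw [h2]; push_cast; ring
      have hrs : rs.length ≤ n := by omega
      rw [henum, hr, List.foldl_append,
        pvSkip fd t1 cur (j*fd) segs _ ht1all,
        PySem.List.enumerate_cons, List.foldl_cons]
      have hstep : pvStepA fd (cur, j*fd, segs) (j+1+(t1.length : Int), r) =
          (r, (j+1+(t1.length : Int)) * fd,
           segs ++ [(cur, j*fd, (j+1+(t1.length : Int)) * fd)]) := by
        simp [pvStepA, hrne]
      rw [hstep]
      have key := ih rs hrs r (j+1+(t1.length : Int))
        (segs ++ [(cur, j*fd, (j+1+(t1.length : Int)) * fd)])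
      simp only [] at key ⊢
      rw [show j + 1 + (tail.length : Int) =
          (j+1+(t1.length : Int)) + 1 + (rs.length : Int) by rw [hlen]; ring]
      rw [key]
      simp

-- ---- B side: boundary lists ----
def pvCond (xs : List String) : Nat → Bool :=
  fun i => decide (xs.getD i "" ≠ xs.getD (i - 1) "")

def pvCuts (xs : List String) : List Nat :=
  0 :: ((List.range' 1 (xs.length - 1)).filter (pvCond xs) ++ [xs.length])

def pvSeg (xs : List String) (j fd : Int) : List (String × Int × Int) :=
  ((pvCuts xs).zip ((pvCuts xs).drop 1)).map
    (fun be => (xs.getD be.1 "", (j + (be.1 : Int)) * fd, (j + (be.2 : Int)) * fd))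

theorem pvGetShift (x : String) (rest : List String) (m : Nat) :
    (x :: rest).getD ((rest.takeWhile (· == x)).length + 1 + m) "" =
    (rest.dropWhile (· == x)).getD m "" := by
  have hsplit : rest.takeWhile (· == x) ++ rest.dropWhile (· == x) = rest :=
    List.takeWhile_append_dropWhile
  have h := List.getD_append_right (rest.takeWhile (· == x)) (rest.dropWhile (· == x)) ""
      ((rest.takeWhile (· == x)).length + m) (by omega)
  rw [hsplit, Nat.add_sub_cancel_left] at h
  rw [show (rest.takeWhile (· == x)).length + 1 + m =
      ((rest.takeWhile (· == x)).length + m) + 1 by omega,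
    List.getD_cons_succ, h]

theorem pvCutsCons (x : String) (rest : List String) :
    pvCuts (x :: rest) =
      if rest.dropWhile (· == x) = [] then [0, rest.length + 1]
      else 0 :: ((pvCuts (rest.dropWhile (· == x))).map
        (· + ((rest.takeWhile (· == x)).length + 1))) := by
  set run := rest.takeWhile (· == x) with hrun
  set rest' := rest.dropWhile (· == x) with hrest'
  have hsplit : run ++ rest' = rest := List.takeWhile_append_dropWhile
  have hlen : rest.length = run.length + rest'.length := by
    rw [← hsplit, List.length_append]
  have hrunx : ∀ m, m < run.length → run.getD m "" = x := by
    intro m hm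
    have hmem : run[m] ∈ run := List.getElem_mem hm
    have hx := eq_of_beq (List.mem_takeWhile_imp (p := (· == x)) hmem)
    rw [List.getD_eq_getElem _ _ hm]
    exact hx
  have gAll : ∀ i, i ≤ run.length → (x :: rest).getD i "" = x := by
    intro i hi
    match i with
    | 0 => rfl
    | Nat.succ m =>
      have hm : m < run.length := by omega
      rw [List.getD_cons_succ, ← hsplit, List.getD_append _ _ _ _ hm]
      exact hrunx m hm
  have gShift : ∀ m, (x :: rest).getD (run.length + 1 + m) "" = rest'.getD m "" := by
    intro m
    rw [show run.length + 1 + m = (run.length + m) + 1 by omega,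
      List.getD_cons_succ, ← hsplit,
      List.getD_append_right _ _ _ _ (by omega)]
    congr 1
    omega
  have gPrev : ∀ m, 1 ≤ m → (x :: rest).getD (run.length + m) "" = rest'.getD (m - 1) "" := by
    intro m hm
    rw [show run.length + m = (run.length + (m - 1)) + 1 by omega,
      List.getD_cons_succ, ← hsplit,
      List.getD_append_right _ _ _ _ (by omega)]
    congr 1
    omega
  have cFail : (List.range' 1 run.length).filter (pvCond (x :: rest)) = [] := by
    rw [List.filter_eq_nil_iff]
    intro i hi
    rw [List.mem_range'_1] at hi
    have h1 : (x :: rest).getD i "" = x := gAll i (by omega)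
    have h2 : (x :: rest).getD (i - 1) "" = x := gAll (i - 1) (by omega)
    simp only [pvCond]
    rw [h1, h2]
    simp
  have hsplitRange : List.range' 1 (run.length + rest'.length) =
      List.range' 1 run.length ++ List.range' (1 + run.length) rest'.length := by
    simp
  unfold pvCuts
  simp only [List.length_cons, Nat.add_sub_cancel]
  rw [hlen, hsplitRange, List.filter_append, cFail, List.nil_append]
  cases hr : rest' with
  | nil =>
    rw [hr] at hlen
    simp
  | cons r0 rtail =>
    have hne : rest' ≠ [] := by rw [hr]; simp
    rw [← hr, if_neg hne]
    have hr0x : r0 ≠ x := by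
      have hb := pvDropWhileHead (· == x) rest r0 rtail (hrest'.symm.trans hr)
      intro h
      rw [h] at hb
      simp at hb
    have hcFirst : pvCond (x :: rest) (1 + run.length) = true := by
      have h1 : (x :: rest).getD (1 + run.length) "" = r0 := by
        have := gShift 0
        rw [show run.length + 1 + 0 = 1 + run.length by omega] at this
        rw [this, hr]
        rfl
      have h2 : (x :: rest).getD (1 + run.length - 1) "" = x :=
        gAll _ (by omega)
      simp only [pvCond]
      rw [h1, h2]
      simp [hr0x]
    have hmapRange : List.range' (1 + run.length + 1) rtail.length =
        List.map (fun m => (run.length + 1) + m) (List.range' 1 rtail.length) := by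
      rw [List.map_add_range']
      congr 1
      omega
    have hcShift : ∀ m ∈ List.range' 1 rtail.length,
        (pvCond (x :: rest) ∘ (fun m => (run.length + 1) + m)) m = pvCond rest' m := by
      intro m hm
      rw [List.mem_range'_1] at hm
      have h1 : (x :: rest).getD (run.length + 1 + m) "" = rest'.getD m "" := gShift m
      have h2 : (x :: rest).getD (run.length + 1 + m - 1) "" = rest'.getD (m - 1) "" := by
        rw [show run.length + 1 + m - 1 = run.length + (1 + m - 1) by omega]
        rw [gPrev (1 + m - 1) (by omega)]
        congr 1
        omega
      simp only [Function.comp_apply, pvCond]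
      rw [show (run.length + 1) + m = run.length + 1 + m by omega, h1, h2]
    rw [hr] at hlen
    rw [show rest'.length = rtail.length + 1 by rw [hr]; rfl] at hsplitRange ⊢
    rw [List.range'_succ, List.filter_cons, hmapRange, List.filter_map,
      List.filter_congr hcShift]
    rw [if_pos hcFirst]
    simp only [Nat.add_sub_cancel, List.map_cons, List.map_append]
    rw [List.map_congr_left (l := List.filter (pvCond rest') (List.range' 1 rtail.length))
      (f := fun m => run.length + 1 + m) (g := fun m => m + (run.length + 1))
      (fun a _ => by show run.length + 1 + a = a + (run.length + 1); omega)]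
    have e1 : 1 + run.length = 0 + (run.length + 1) := by omega
    have e2 : run.length + (rtail.length + 1) + 1 = (rtail.length + 1) + (run.length + 1) := by omega
    rw [e1, e2]
    simp

theorem pvBMain (fd : Int) (N : Nat) (xs : List String) (hN : xs.length ≤ N)
    (hne : xs ≠ []) (j : Int) :
    pvGroups xs j fd = pvSeg xs j fd := by
  induction N generalizing xs j with
  | zero =>
    cases xs with
    | nil => exact absurd rfl hne
    | cons a l => simp at hN
  | succ N ih =>
    cases xs with
    | nil => exact absurd rfl hne
    | cons x rest =>
      have hdrop : rest.drop (rest.takeWhile (· == x)).length = rest.dropWhile (· == x) := by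
        have h := List.drop_left (l₁ := rest.takeWhile (· == x)) (l₂ := rest.dropWhile (· == x))
        rwa [List.takeWhile_append_dropWhile] at h
      rw [pvGroups]
      simp only [hdrop]
      unfold pvSeg
      rw [pvCutsCons]
      cases hre : rest.dropWhile (· == x) with
      | nil =>
        have htake : rest.takeWhile (· == x) = rest := by
          have h := List.takeWhile_append_dropWhile (p := (· == x)) (l := rest)
          rw [hre] at h
          simpa using h
        rw [if_pos rfl, htake]
        simp [pvGroups]
        exact Or.inl (by ring)
      | cons r0 rtail =>
        rw [if_neg (List.cons_ne_nil r0 rtail)]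
        set k := (rest.takeWhile (· == x)).length with hk
        have hlenle : (r0 :: rtail).length ≤ N := by
          have h1 : rest.length ≤ N := by
            simp only [List.length_cons] at hN
            omega
          have h2 : (rest.dropWhile (· == x)).length ≤ rest.length :=
            List.length_dropWhile_le _ _
          rw [hre] at h2
          omega
        rw [ih (r0 :: rtail) hlenle (List.cons_ne_nil r0 rtail) (j + 1 + (k : Int))]
        set cr := pvCuts (r0 :: rtail) with hcr
        have hcr0 : cr = 0 :: ((List.range' 1 ((r0 :: rtail).length - 1)).filter
            (pvCond (r0 :: rtail)) ++ [(r0 :: rtail).length]) := rfl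
        set f : Nat → Nat := (· + (k + 1)) with hf
        have hmapcr : cr.map f = (k + 1) :: ((List.range' 1 ((r0 :: rtail).length - 1)).filter
            (pvCond (r0 :: rtail)) ++ [(r0 :: rtail).length]).map f := by
          rw [hcr0]
          simp [hf]
        have hz : (cr.map f).zip ((cr.map f).drop 1) =
            (cr.zip (cr.drop 1)).map (Prod.map f f) := by
          rw [← List.map_drop, List.zip_map]
        have hzipC : ((0 :: cr.map f).zip ((0 :: cr.map f).drop 1)) =
            (0, k + 1) :: (cr.zip (cr.drop 1)).map (Prod.map f f) := by
          rw [← hz, hmapcr]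
          simp [List.zip_cons_cons]
        rw [hzipC, List.map_cons, List.map_map]
        congr 1
        · simp only [List.getD_cons_zero, Prod.mk.injEq]
          push_cast
          refine ⟨trivial, by ring, by ring⟩
        · unfold pvSeg
          rw [← hcr]
          apply List.map_congr_left
          intro be _
          obtain ⟨b, e⟩ := be
          have hgb := pvGetShift x rest b
          have hge := pvGetShift x rest e
          rw [hre] at hgb hge
          simp only [Function.comp_apply, Prod.map, hf]
          rw [show b + (k + 1) = k + 1 + b from by omega, hgb]
          simp only [Prod.mk.injEq]
          push_cast
          refine ⟨trivial, by ring, by ring⟩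

theorem pvAltEq (xs : List String) (fd : Int) (hne : xs ≠ []) :
    predictions_to_segments_alt xs fd = pvSeg xs 0 fd := by
  unfold predictions_to_segments_alt pvSeg pvCuts pvCond
  simp [List.length_eq_zero_iff, hne, zero_add]

-- ===== VERDICT (by name: the statement is the Claim_ definition above) =====
theorem predictions_to_segments_spec : Claim_equal_predictions_to_segments := by
  intro predictions fd _
  unfold Spec_predictions_to_segments
  match predictions with
  | [] => simp [predictions_to_segments, predictions_to_segments_alt]
  | p0 :: rest =>
    have hA := pvMain fd rest.length rest le_rfl p0 0 []
    have hne : p0 :: rest ≠ [] := by simp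
    rw [pvAltEq _ _ hne, ← pvBMain fd (p0 :: rest).length _ le_rfl hne 0]
    unfold predictions_to_segments
    simp only [zero_mul, zero_add] at hA ⊢
    rw [show (((p0 :: rest).length : Int)) = 1 + (rest.length : Int) by simp; omega]
    simpa using hA
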